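-- pv_equiv track=rewrite | github.com/ChipsTruffe/Deep-learning-retweet-prediction | tokenizer.py | clean_tokenizer
-- ===== SOURCE A (Python) =====
-- import string
--
-- def clean_tokenizer(text):
--     """lowercase, removes punctuation, removes hashtags, splits by spaces, splits words longer than 6"""
--
--
--     current_text = text.lower()
--
--     # 2. Remove punctuation
--
--     translator = str.maketrans('', '', string.punctuation)
--     current_text = current_text.translate(translator)
--     words = current_text.split()
--
--     final_tokens = []
--     for word in words:
--         while len(word) > 4: #splits words in maximum 6 char sections
--             final_tokens.append(word[:4])
--             word = word[4:]
--         final_tokens.append(word)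
--
--     return final_tokens
-- ===== SOURCE B (Python) =====
-- import string
--
-- def clean_tokenizer(text):
--     """lowercase, removes punctuation, splits by spaces, chunks each word into 4-char pieces by index arithmetic"""
--     cleaned = text.lower().translate(str.maketrans('', '', string.punctuation))
--     return [w[i:i + 4] for w in cleaned.split() for i in range(0, len(w), 4)]
-- ===== Notes on version B (the rewrite author's own statement) =====
-- stated objective: simpler
-- what changed: Replaces the destructive while-loop that repeatedly appends word[:4] and rebinds word = word[4:] with direct index stepping: a single flat comprehension slices each word at positions 0,4,8,... computed by range arithmetic, with no rebinding and no explicit accumulator.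
import Mathlib
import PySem

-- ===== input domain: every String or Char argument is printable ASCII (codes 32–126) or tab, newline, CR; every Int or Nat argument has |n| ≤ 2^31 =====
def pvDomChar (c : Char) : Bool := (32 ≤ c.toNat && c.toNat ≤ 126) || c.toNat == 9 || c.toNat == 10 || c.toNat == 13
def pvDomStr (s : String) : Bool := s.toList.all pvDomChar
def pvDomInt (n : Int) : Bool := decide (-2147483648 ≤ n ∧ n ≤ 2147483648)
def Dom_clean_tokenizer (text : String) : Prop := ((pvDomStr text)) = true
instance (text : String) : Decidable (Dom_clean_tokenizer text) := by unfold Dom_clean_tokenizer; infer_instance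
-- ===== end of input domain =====

-- B replaces A's destructive while-loop (word = word[4:]) by direct index stepping over range(0, len(w), 4); same tokens, simpler loop.

-- string.punctuation (shared preamble constant of both versions)
def pvPunct : List Char := "!\"#$%&'()*+,-./:;<=>?@[\\]^_`{|}~".toList

-- ===== PORT A =====
-- the 'while len(word) > 4: append word[:4]; word = word[4:]' loop, then append the remainder
def pvChunkA (word : String) : List String :=
  if 4 < PySem.Str.len word then
    PySem.Str.slice word none (some 4) :: pvChunkA (PySem.Str.slice word (some 4) none)
  else [word]
termination_by word.toList.length
decreasing_by
  have h : (4:Int) < word.toList.length := by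
    simpa [PySem.Str.len_eq] using ‹4 < PySem.Str.len word›
  have ht : (PySem.Str.slice word (some 4) none).toList = word.toList.drop 4 := by
    rw [PySem.Str.toList_slice, PySem.Chars.slice_eq_listSlice,
        PySem.List.slice_from _ (by norm_num : (0:Int) ≤ 4)]
    rfl
  rw [ht]
  simp only [List.length_drop]
  omega

def clean_tokenizer (text : String) : List String :=
  let current_text := PySem.Str.lower text
  -- current_text.translate(str.maketrans('', '', string.punctuation)): exact — a delete-only table removes exactly those characters
  let current_text := String.ofList (current_text.toList.filter (fun c => !pvPunct.contains c))
  let words := PySem.Str.split₀ current_text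
  words.foldl (fun final_tokens word => final_tokens ++ pvChunkA word) []

-- ===== PORT B =====
def clean_tokenizer_alt (text : String) : List String :=
  let cleaned := String.ofList ((PySem.Str.lower text).toList.filter (fun c => !pvPunct.contains c))
  (PySem.Str.split₀ cleaned).flatMap (fun w =>
    (PySem.List.pyRange 0 (PySem.Str.len w) 4).map
      (fun i => PySem.Str.slice w (some i) (some (i + 4))))

-- ===== PRECONDITION & SPEC =====
def Spec_clean_tokenizer (text : String) (out : List String) : Prop := out = clean_tokenizer_alt text
instance (text : String) (out : List String) : Decidable (Spec_clean_tokenizer text out) := by unfold Spec_clean_tokenizer; infer_instance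

-- ===== CLAIM (what is proved, stated in full; the proofs are below) =====
def Claim_equal_clean_tokenizer : Prop := ∀ (text : String), Dom_clean_tokenizer text → Spec_clean_tokenizer text (clean_tokenizer text)

-- ===== LEMMAS AND PROOFS =====

-- every piece produced by str.split() is nonempty
lemma pvGo_ne_nil (l : List Char) : ∀ (cur : List Char) (acc : List (List Char)),
    (∀ p ∈ acc, p ≠ []) → ∀ p ∈ PySem.Chars.split₀.go l cur acc, p ≠ [] := by
  induction l with
  | nil =>
      intro cur acc hacc p hp
      simp only [PySem.Chars.split₀.go] at hp
      split_ifs at hp with hc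
      · exact hacc p (by simpa using hp)
      · rcases (by simpa using hp : p ∈ acc ∨ p = cur.reverse) with h | h
        · exact hacc p h
        · subst h; simpa [List.isEmpty_iff] using hc
  | cons c rest ih =>
      intro cur acc hacc p hp
      simp only [PySem.Chars.split₀.go] at hp
      split_ifs at hp with h1 h2
      · exact ih [] acc hacc p hp
      · refine ih [] (cur.reverse :: acc) ?_ p hp
        intro q hq
        rcases hq with _ | hq
        · simpa [List.isEmpty_iff] using h2
        · exact hacc q (by assumption)
      · exact ih (c :: cur) acc hacc p hp

lemma pvSplit₀_ne_nil (s : String) : ∀ w ∈ PySem.Str.split₀ s, w.toList ≠ [] := by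
  intro w hw
  simp only [PySem.Str.split₀, List.mem_map] at hw
  obtain ⟨p, hp, rfl⟩ := hw
  have := pvGo_ne_nil s.toList [] [] (by simp) p (by simpa [PySem.Chars.split₀] using hp)
  simpa using this

-- range(0, n, 4) for 0 < n ≤ 4 is [0]
lemma pvPyRange4_single (n : Int) (h0 : 0 < n) (h4 : n ≤ 4) :
    PySem.List.pyRange 0 n 4 = [0] := by
  simp only [PySem.List.pyRange]
  norm_num [h0]
  rw [show ((n + 4 - 1) / 4).toNat = 1 from by omega, List.range_one]

-- range(0, n, 4) for 4 < n peels its head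
lemma pvPyRange4_cons (n : Int) (h : 4 < n) :
    PySem.List.pyRange 0 n 4 = 0 :: (PySem.List.pyRange 0 (n - 4) 4).map (fun i => i + 4) := by
  have h0 : (0:Int) < n := by omega
  have h0' : (0:Int) < n - 4 := by omega
  simp only [PySem.List.pyRange]
  norm_num [h0, h0']
  rw [if_pos h, show ((n + 4 - 1) / 4).toNat = ((n - 1) / 4).toNat + 1 from by omega,
      List.range_succ_eq_map, List.map_cons, List.map_map]
  refine List.cons_eq_cons.mpr ⟨by norm_num, ?_⟩
  apply List.map_congr_left
  intro k _
  simp only [Function.comp_apply]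
  push_cast
  ring

lemma pvMem_pyRange4_nonneg (m i : Int) (h : i ∈ PySem.List.pyRange 0 m 4) : 0 ≤ i := by
  simp only [PySem.List.pyRange, if_neg (by norm_num : ¬ (4:Int) = 0), List.mem_map] at h
  obtain ⟨k, _, rfl⟩ := h
  positivity

-- the chunking loop of A equals B's index-stepping comprehension on a nonempty word
set_option maxHeartbeats 1000000 in
lemma pvChunkA_eq_aux : ∀ (n : Nat) (w : String), w.toList.length ≤ n → w.toList ≠ [] →
    pvChunkA w = (PySem.List.pyRange 0 (PySem.Str.len w) 4).map
      (fun i => PySem.Str.slice w (some i) (some (i + 4))) := by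
  intro n
  induction n with
  | zero =>
      intro w h hw
      exact absurd (List.length_eq_zero_iff.mp (by omega)) hw
  | succ n ihn =>
      intro w hlen hw
      by_cases h : 4 < PySem.Str.len w
      case pos =>
        have hn : (4:Int) < w.toList.length := by simpa [PySem.Str.len_eq] using h
        have htail : (PySem.Str.slice w (some 4) none).toList = w.toList.drop 4 := by
          rw [PySem.Str.toList_slice, PySem.Chars.slice_eq_listSlice,
              PySem.List.slice_from _ (by norm_num : (0:Int) ≤ 4)]
          rfl
        have hw' : (PySem.Str.slice w (some 4) none).toList ≠ [] := by
          rw [htail]; intro hc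
          have := congrArg List.length hc
          simp only [List.length_drop, List.length_nil] at this; omega
        have hlen' : (PySem.Str.slice w (some 4) none).toList.length ≤ n := by
          rw [htail]; simp only [List.length_drop]; omega
        have ih := ihn (PySem.Str.slice w (some 4) none) hlen' hw'
        rw [pvChunkA.eq_def, if_pos h, ih]
        rw [show PySem.Str.len w = (w.toList.length : Int) from PySem.Str.len_eq w,
            pvPyRange4_cons _ hn, List.map_cons, List.map_map]
        refine List.cons_eq_cons.mpr ⟨?_, ?_⟩
        · -- head: w[:4] = w[0:0+4]
          rw [← String.toList_inj, PySem.Str.toList_slice, PySem.Str.toList_slice,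
              PySem.Chars.slice_eq_listSlice, PySem.Chars.slice_eq_listSlice,
              PySem.List.slice_to _ (by norm_num : (0:Int) ≤ 4),
              PySem.List.slice_toNat _ (by norm_num : (0:Int) ≤ 0) (by norm_num : (0:Int) ≤ 0 + 4)]
          rfl
        · -- tail: chunks of w[4:] at i are chunks of w at i+4
          rw [show PySem.Str.len (PySem.Str.slice w (some 4) none) = ((w.toList.length : Int) - 4) by
                rw [PySem.Str.len_eq, htail]; simp only [List.length_drop]; omega]
          apply List.map_congr_left
          intro i hi
          have hi0 : 0 ≤ i := pvMem_pyRange4_nonneg _ _ hi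
          rw [← String.toList_inj]
          simp only [Function.comp_apply, PySem.Str.toList_slice, PySem.Chars.slice_eq_listSlice]
          rw [PySem.List.slice_from _ (by norm_num : (0:Int) ≤ 4),
              PySem.List.slice_toNat _ hi0 (by omega : (0:Int) ≤ i + 4),
              PySem.List.slice_toNat _ (by omega : (0:Int) ≤ i + 4) (by omega : (0:Int) ≤ i + 4 + 4),
              List.drop_drop]
          congr 1
          · omega
          · congr 1; omega
      case neg =>
        have hl : 0 < w.toList.length := List.length_pos_iff.mpr hw
        have hn0 : (0:Int) < w.toList.length := by exact_mod_cast hl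
        have hn4 : (w.toList.length : Int) ≤ 4 := by
          rw [PySem.Str.len_eq w] at h; omega
        rw [pvChunkA.eq_def, if_neg h]
        rw [show PySem.Str.len w = (w.toList.length : Int) from PySem.Str.len_eq w,
            pvPyRange4_single _ hn0 hn4]
        simp only [List.map_cons, List.map_nil]
        congr 1
        rw [← String.toList_inj, PySem.Str.toList_slice, PySem.Chars.slice_eq_listSlice,
            PySem.List.slice_toNat _ (by norm_num : (0:Int) ≤ 0) (by norm_num : (0:Int) ≤ 0 + 4)]
        simp only [Int.toNat_zero, List.drop_zero]
        exact (List.take_of_length_le (by omega)).symm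

lemma pvChunkA_eq (w : String) (hw : w.toList ≠ []) :
    pvChunkA w = (PySem.List.pyRange 0 (PySem.Str.len w) 4).map
      (fun i => PySem.Str.slice w (some i) (some (i + 4))) :=
  pvChunkA_eq_aux w.toList.length w le_rfl hw

lemma pvFlatMap_congr {α β : Type} (l : List α) (f g : α → List β)
    (h : ∀ x ∈ l, f x = g x) : l.flatMap f = l.flatMap g := by
  induction l with
  | nil => rfl
  | cons x xs ih =>
      simp only [List.flatMap_cons]
      rw [h x (by simp), ih (fun y hy => h y (by simp [hy]))]

-- ===== VERDICT (by name: the statement is the Claim_ definition above) =====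
theorem clean_tokenizer_spec : Claim_equal_clean_tokenizer := by
  intro text _
  unfold Spec_clean_tokenizer clean_tokenizer clean_tokenizer_alt
  dsimp only
  rw [PySem.List.foldl_append_eq_flatMap, List.nil_append]
  exact pvFlatMap_congr _ _ _ (fun w hw => pvChunkA_eq w (pvSplit₀_ne_nil _ w hw))
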